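-- pv_equiv track=rewrite | github.com/michael-kucek/staarbot | tables.py | get_col_w
-- ===== SOURCE A (Python) =====
-- def get_col_w(array):
--     rows = len(array)
--     cols = len(array[0])
--     max_len = []
--     big_len = []
--     for j in range(cols):
--         small_len = []
--         for i in range(rows):
--             small_len.append(len(array[i][j]))
--         big_len.append(small_len)
--     for row in big_len:
--         max_len.append(max(row))
--     return max_len
-- ===== SOURCE B (Python) =====
-- def get_col_w(array):
--     max_len = [len(x) for x in array[0]]
--     for i in range(1, len(array)):
--         row = array[i]
--         for j in range(len(max_len)):
--             max_len[j] = max(max_len[j], len(row[j]))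
--     return max_len
-- ===== Notes on version B (the rewrite author's own statement) =====
-- stated objective: alternative
-- what changed: Replaces the column-major build of all per-column length lists (big_len) plus a second max pass with a single row-major pass keeping a running max per column, seeded from the first row.
import Mathlib
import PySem

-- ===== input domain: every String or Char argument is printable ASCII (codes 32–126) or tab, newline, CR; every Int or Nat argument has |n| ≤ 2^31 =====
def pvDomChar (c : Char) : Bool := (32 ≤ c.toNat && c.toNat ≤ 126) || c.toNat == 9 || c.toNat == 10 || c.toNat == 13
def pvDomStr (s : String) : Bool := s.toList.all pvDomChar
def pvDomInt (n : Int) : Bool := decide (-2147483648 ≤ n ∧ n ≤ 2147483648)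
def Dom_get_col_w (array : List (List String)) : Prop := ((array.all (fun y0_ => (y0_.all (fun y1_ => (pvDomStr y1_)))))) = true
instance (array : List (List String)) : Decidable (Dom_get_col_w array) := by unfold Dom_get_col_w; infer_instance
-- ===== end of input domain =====

-- B fuses A's build-then-reduce (big_len, then a max pass) into one row-major running-max
-- accumulator per column, seeded from the first row: a different decomposition of the same task.

-- ===== PORT A =====
def get_col_w (array : List (List String)) : List Int :=
  let rows := array.length
  let cols := (array.getD 0 []).length
  let big_len := (List.range cols).foldl (fun bl j =>
    bl ++ [(List.range rows).foldl (fun sl i =>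
      sl ++ [PySem.Str.len ((array.getD i []).getD j "")]) []]) []
  big_len.foldl (fun ml row => ml ++ [(PySem.List.max? row (fun y => y)).getD 0]) []

-- ===== PORT B =====
def get_col_w_alt (array : List (List String)) : List Int :=
  let max_len := (array.getD 0 []).map (fun x => PySem.Str.len x)
  (array.drop 1).foldl (fun ml row =>
    ml.mapIdx (fun j v => max v (PySem.Str.len (row.getD j "")))) max_len

-- ===== PRECONDITION & SPEC =====
-- Pre_ excludes exactly the inputs where Python A raises: the empty array (array[0] IndexError)
-- and ragged arrays with some row shorter than the first row (array[i][j] IndexError).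
def Pre_get_col_w (array : List (List String)) : Prop :=
  array ≠ [] ∧ ∀ row ∈ array, (array.getD 0 []).length ≤ row.length
instance (array : List (List String)) : Decidable (Pre_get_col_w array) := by unfold Pre_get_col_w; infer_instance
def pvWitness_get_col_w : List (List String) := [["a", "bb"], ["ccc", "d"]]
def Spec_get_col_w (array : List (List String)) (out : List Int) : Prop := out = get_col_w_alt array
instance (array : List (List String)) (out : List Int) : Decidable (Spec_get_col_w array out) := by unfold Spec_get_col_w; infer_instance

-- ===== CLAIM (what is proved, stated in full; the proofs are below) =====
def Claim_equal_get_col_w : Prop := ∀ (array : List (List String)), Dom_get_col_w array → Pre_get_col_w array → Spec_get_col_w array (get_col_w array)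

-- ===== LEMMAS AND PROOFS =====

-- 'for i in range(len(xs)): … xs[i] …' traverses xs itself.
theorem map_range_getD {α β : Type} (l : List α) (d : α) {f : α → β} :
    (List.range l.length).map (fun i => f (l.getD i d)) = l.map f := by
  apply List.ext_getElem
  · simp
  · intro j h1 h2
    have hj : j < l.length := by simpa using h2
    simp [List.getD_eq_getElem?_getD, List.getElem?_eq_getElem hj]

-- A in closed form: for each column j, the running max over the per-row lengths.
theorem getColW_A_eq (a : List String) (rest : List (List String)) :
    get_col_w (a :: rest)
      = (List.range a.length).map (fun j =>
          (rest.map (fun r => PySem.Str.len (r.getD j ""))).foldl max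
            (PySem.Str.len (a.getD j ""))) := by
  unfold get_col_w
  simp only [PySem.List.foldl_append_singleton_eq_map, List.nil_append, List.map_map]
  refine List.map_congr_left (fun j hj => ?_)
  have h1 : (List.range (a :: rest).length).map
      (fun i => PySem.Str.len (((a :: rest).getD i []).getD j ""))
      = (a :: rest).map (fun r => PySem.Str.len (r.getD j "")) :=
    map_range_getD (a :: rest) [] (f := fun r => PySem.Str.len (r.getD j ""))
  simp only [Function.comp, h1, List.map_cons, PySem.List.max?_id_cons, Option.getD_some,
    List.foldl_map]

-- B's row fold, column-wise: each slot j of the accumulator evolves independently.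
theorem foldB (rest : List (List String)) (acc : List Int) :
    rest.foldl (fun ml row => ml.mapIdx (fun j v => max v (PySem.Str.len (row.getD j "")))) acc
      = (List.range acc.length).map (fun j =>
          rest.foldl (fun v row => max v (PySem.Str.len (row.getD j ""))) (acc.getD j 0)) := by
  induction rest generalizing acc with
  | nil =>
      simp only [List.foldl_nil]
      apply List.ext_getElem
      · simp
      · intro j h1 h2
        simp_all [List.getD_eq_getElem?_getD]
  | cons r t ih =>
      simp only [List.foldl_cons]
      rw [ih]
      have hlen : (acc.mapIdx (fun j v => max v (PySem.Str.len (r.getD j "")))).length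
          = acc.length := by simp
      rw [hlen]
      refine List.map_congr_left (fun j hj => ?_)
      have hj' : j < acc.length := List.mem_range.mp hj
      congr 1
      rw [List.getD_eq_getElem?_getD, List.getD_eq_getElem?_getD]
      simp [List.getElem?_eq_getElem hj']

theorem getColW_B_eq (a : List String) (rest : List (List String)) :
    get_col_w_alt (a :: rest)
      = (List.range a.length).map (fun j =>
          rest.foldl (fun v row => max v (PySem.Str.len (row.getD j "")))
            (PySem.Str.len (a.getD j ""))) := by
  unfold get_col_w_alt
  simp only [List.getD_cons_zero, List.drop_one, List.tail_cons]
  rw [foldB]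
  simp only [List.length_map]
  refine List.map_congr_left (fun j hj => ?_)
  have hj' : j < a.length := List.mem_range.mp hj
  congr 1
  rw [List.getD_eq_getElem?_getD, List.getD_eq_getElem?_getD]
  simp [List.getElem?_eq_getElem hj']

-- ===== VERDICT (by name: the statement is the Claim_ definition above) =====
theorem get_col_w_spec : Claim_equal_get_col_w := by
  intro array _ hpre
  obtain ⟨hne, -⟩ := hpre
  match array, hne with
  | a :: rest, _ =>
    unfold Spec_get_col_w
    rw [getColW_A_eq, getColW_B_eq]
    refine List.map_congr_left (fun j _ => ?_)
    rw [List.foldl_map]
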